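-- pv_equiv track=rewrite | github.com/hillerlab/TOGA | modules/inact_mut_check.py | split_to_codons
-- ===== SOURCE A (Python) =====
-- from collections import defaultdict
--
-- def split_to_codons(ref, que):
--     """Create codon_num->(ref_seq, que_seq) dict."""
--     ref_not_space = [i for i, c in enumerate(ref) if c != " "]
--     ref_merge, que_merge = "", ""
--     for i in ref_not_space:
--         ref_merge += ref[i]
--         que_merge += que[i]
--     ref_codon_to_seq = defaultdict(str)
--     que_codon_to_seq = defaultdict(str)
--     curr_codon = 1
--     for i in range(len(ref_merge)):
--         ref_codon_to_seq[curr_codon] += ref_merge[i].upper()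
--         que_codon_to_seq[curr_codon] += que_merge[i].upper()
--         ref_codon_len = len([c for c in ref_codon_to_seq[curr_codon] if c.isalpha()])
--         if ref_codon_len == 3:
--             curr_codon += 1
--     return ref_codon_to_seq, que_codon_to_seq
-- ===== SOURCE B (Python) =====
-- def split_to_codons(ref, que):
--     """Create codon_num->(ref_seq, que_seq) dict.
--
--     One pass over zip(ref, que), maintaining an incremental count of
--     alphabetic characters in the current codon instead of rescanning it.
--     """
--     ref_items, que_items = [], []
--     cur_ref, cur_que = [], []
--     alpha = 0
--     codon = 1
--     for rc, qc in zip(ref, que):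
--         if rc == " ":
--             continue
--         rc = rc.upper()
--         cur_ref.append(rc)
--         cur_que.append(qc.upper())
--         if rc.isalpha():
--             alpha += 1
--             if alpha == 3:
--                 ref_items.append((codon, "".join(cur_ref)))
--                 que_items.append((codon, "".join(cur_que)))
--                 cur_ref, cur_que = [], []
--                 alpha = 0
--                 codon += 1
--     if cur_ref:
--         ref_items.append((codon, "".join(cur_ref)))
--         que_items.append((codon, "".join(cur_que)))
--     return dict(ref_items), dict(que_items)
-- ===== Notes on version B (the rewrite author's own statement) =====
-- stated objective: faster
-- what changed: Single pass over zip(ref,que) that keeps an incremental alphabetic count and the current codon buffer, emitting each codon once, instead of building two merged strings and rescanning the growing current-codon string at every character.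
import Mathlib
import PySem

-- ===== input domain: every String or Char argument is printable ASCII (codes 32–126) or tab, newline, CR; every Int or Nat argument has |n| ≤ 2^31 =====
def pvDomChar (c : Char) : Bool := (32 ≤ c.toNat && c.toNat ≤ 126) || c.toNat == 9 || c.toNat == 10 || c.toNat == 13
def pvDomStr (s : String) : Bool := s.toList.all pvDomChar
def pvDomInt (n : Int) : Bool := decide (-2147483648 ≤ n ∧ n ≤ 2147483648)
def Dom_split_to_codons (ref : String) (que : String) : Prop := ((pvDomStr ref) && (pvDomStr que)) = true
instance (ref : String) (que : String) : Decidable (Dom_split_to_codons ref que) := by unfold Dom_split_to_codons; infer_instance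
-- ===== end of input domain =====

-- B changes the algorithm: one pass with an incremental per-codon alphabetic count instead of
-- rescanning the growing current-codon string at every character (objective: faster).

-- ===== PORT A =====
-- per-character body of A's second loop (dict update + rescan of the current codon)
def split_to_codonsStep (rm qm : List Char)
    (st : PySem.Dict Int String × PySem.Dict Int String × Int) (i : Int) :
    PySem.Dict Int String × PySem.Dict Int String × Int :=
  match st with
  | (d1, d2, cc) =>
    let d1' := d1.insert cc (d1.getD cc "" ++ String.ofList [PySem.Chars.upperChar (PySem.List.pyGetD rm i ' ')])
    let d2' := d2.insert cc (d2.getD cc "" ++ String.ofList [PySem.Chars.upperChar (PySem.List.pyGetD qm i ' ')])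
    let ref_codon_len := ((d1'.getD cc "").toList.filter (fun c => PySem.Chars.isalpha c)).length
    if ref_codon_len == 3 then (d1', d2', cc + 1) else (d1', d2', cc)

def split_to_codons (ref : String) (que : String) : (List (Int × String)) × (List (Int × String)) :=
  let refL := ref.toList
  let queL := que.toList
  let ref_not_space := ((PySem.List.enumerate refL).filter (fun p => p.2 != ' ')).map (·.1)
  let m := ref_not_space.foldl
    (fun (acc : List Char × List Char) i =>
      (acc.1 ++ [PySem.List.pyGetD refL i ' '], acc.2 ++ [PySem.List.pyGetD queL i ' '])) ([], [])
  let ref_merge := m.1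
  let que_merge := m.2
  let res := (PySem.List.pyRange 0 (ref_merge.length : Int) 1).foldl
    (split_to_codonsStep ref_merge que_merge) (PySem.Dict.empty, PySem.Dict.empty, 1)
  (res.1.items, res.2.1.items)

-- ===== PORT B =====
-- per-pair body of B's single pass (skip spaces, incremental alphabetic count, emit codon at 3)
def split_to_codons_altStep
    (st : List (Int × String) × List (Int × String) × List Char × List Char × Int × Int)
    (p : Char × Char) :
    List (Int × String) × List (Int × String) × List Char × List Char × Int × Int :=
  match st, p with
  | (ri, qi, cr, cq, a, cd), (rc0, qc) =>
    if rc0 == ' ' then (ri, qi, cr, cq, a, cd)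
    else
      let rc := PySem.Chars.upperChar rc0
      let cr' := cr ++ [rc]
      let cq' := cq ++ [PySem.Chars.upperChar qc]
      if PySem.Chars.isalpha rc then
        if a + 1 == 3 then
          (ri ++ [(cd, String.ofList cr')], qi ++ [(cd, String.ofList cq')], [], [], 0, cd + 1)
        else (ri, qi, cr', cq', a + 1, cd)
      else (ri, qi, cr', cq', a, cd)

def split_to_codons_alt (ref : String) (que : String) : (List (Int × String)) × (List (Int × String)) :=
  match (ref.toList.zip que.toList).foldl split_to_codons_altStep ([], [], [], [], 0, 1) with
  | (ri, qi, cr, cq, _, cd) =>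
    if cr.isEmpty then (ri, qi)
    else (ri ++ [(cd, String.ofList cr)], qi ++ [(cd, String.ofList cq)])

-- ===== PRECONDITION & SPEC =====
-- Pre_ excludes exactly the inputs where A raises IndexError: a non-space position of ref
-- that lies beyond the end of que.
def Pre_split_to_codons (ref : String) (que : String) : Prop :=
  ∀ k : Nat, k < ref.toList.length → ref.toList.getD k ' ' ≠ ' ' → k < que.toList.length
instance (ref : String) (que : String) : Decidable (Pre_split_to_codons ref que) := by
  unfold Pre_split_to_codons; infer_instance

def pvWitness_split_to_codons : String × String := ("ATG CCx", "atg ggT")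

def Spec_split_to_codons (ref : String) (que : String)
    (out : (List (Int × String)) × (List (Int × String))) : Prop :=
  out = split_to_codons_alt ref que
instance (ref : String) (que : String) (out : (List (Int × String)) × (List (Int × String))) :
    Decidable (Spec_split_to_codons ref que out) := by unfold Spec_split_to_codons; infer_instance

-- ===== CLAIM (what is proved, stated in full; the proofs are below) =====
def Claim_equal_split_to_codons : Prop := ∀ (ref : String) (que : String),
  Dom_split_to_codons ref que → Pre_split_to_codons ref que →
  Spec_split_to_codons ref que (split_to_codons ref que)

-- ===== LEMMAS AND PROOFS =====

-- the non-space pairs of (ref, que), in order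
def pvMerged (R Q : List Char) : List (Char × Char) := (R.zip Q).filter (fun p => p.1 != ' ')

theorem pv_merge_fold (F G : List Char)
    (hpre : ∀ k : Nat, k < F.length → F.getD k ' ' ≠ ' ' → k < G.length) :
    ∀ (rl : List Char) (s : Nat) (a b : List Char), F.drop s = rl →
    ((((PySem.List.enumerate rl (s : Int)).filter (fun p => p.2 != ' ')).map (·.1)).foldl
      (fun (acc : List Char × List Char) i =>
        (acc.1 ++ [PySem.List.pyGetD F i ' '], acc.2 ++ [PySem.List.pyGetD G i ' '])) (a, b))
    = (a ++ ((rl.zip (G.drop s)).filter (fun p => p.1 != ' ')).map Prod.fst,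
       b ++ ((rl.zip (G.drop s)).filter (fun p => p.1 != ' ')).map Prod.snd) := by
  intro rl
  induction rl with
  | nil => intro s a b _; simp [PySem.List.enumerate]
  | cons r rl ih =>
    intro s a b hdrop
    have hsF : s < F.length := by
      by_contra h
      rw [List.drop_eq_nil_of_le (Nat.le_of_not_lt h)] at hdrop
      exact List.cons_ne_nil _ _ hdrop.symm
    have hcons := List.drop_eq_getElem_cons (i := s) (l := F) hsF
    rw [hdrop] at hcons
    have hFs : F[s] = r := by injection hcons with h1 _; exact h1.symm
    have hdrop' : F.drop (s + 1) = rl := by injection hcons with _ h2; exact h2.symm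
    have hGtail : (G.drop s).tail = G.drop (s + 1) := List.tail_drop
    have hcast : (s : Int) + 1 = ((s + 1 : Nat) : Int) := by push_cast; ring
    rw [PySem.List.enumerate_cons, hcast]
    by_cases hr : r = ' '
    · simp only [List.filter_cons, hr]
      cases hGs : G.drop s with
      | nil =>
        have hG' : G.drop (s + 1) = [] := by rw [← hGtail, hGs]; rfl
        simp only [bne_self_eq_false, Bool.false_eq_true, if_false, List.zip_nil_right,
          List.filter_nil, List.map_nil, List.append_nil]
        have := ih (s + 1) a b hdrop'
        rw [hG'] at this
        simpa using this
      | cons g G' =>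
        have hG' : G.drop (s + 1) = G' := by rw [← hGtail, hGs]; rfl
        simp only [bne_self_eq_false, Bool.false_eq_true, if_false, List.zip_cons_cons,
          List.filter_cons]
        have := ih (s + 1) a b hdrop'
        rw [hG'] at this
        simpa using this
    · have hsG : s < G.length := hpre s hsF (by rw [List.getD_eq_getElem F ' ' hsF, hFs]; exact hr)
      have hGs : G.drop s = G[s] :: G.drop (s + 1) := List.drop_eq_getElem_cons hsG
      have hrb : (r != ' ') = true := by simp [hr]
      simp only [List.filter_cons, hrb, if_true, List.map_cons, List.foldl_cons]
      have hFg : PySem.List.pyGetD F (s : Int) ' ' = r := by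
        rw [PySem.List.pyGetD_natCast, List.getD_eq_getElem F ' ' hsF, hFs]
      have hGg : PySem.List.pyGetD G (s : Int) ' ' = G[s] := by
        rw [PySem.List.pyGetD_natCast, List.getD_eq_getElem G ' ' hsG]
      rw [hFg, hGg, ih (s + 1) (a ++ [r]) (b ++ [G[s]]) hdrop', hGs,
        List.zip_cons_cons, List.filter_cons]
      simp only [hrb, if_true, List.map_cons, List.append_assoc, List.singleton_append]

def pvPad (cd : Int) (cr : List Char) (s : List Char) : List (Int × String) :=
  if cr = [] then [] else [(cd, String.ofList s)]

theorem pv_contains_of_lt (ri : List (Int × String)) (cd : Int) (hlt : ∀ p ∈ ri, p.1 < cd) :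
    (PySem.Dict.mk ri).contains cd = false := by
  rw [PySem.Dict.contains_mk]
  simp only [List.any_eq_false]
  intro p hp
  have := hlt p hp
  simp only [beq_iff_eq]
  omega

theorem pv_keys_nodup (ri : List (Int × String)) (cd : Int) (v : String)
    (hnd : (ri.map Prod.fst).Nodup) (hlt : ∀ p ∈ ri, p.1 < cd) :
    ((ri ++ [(cd, v)]).map Prod.fst).Nodup := by
  rw [List.map_append, List.nodup_append]
  refine ⟨hnd, by simp, ?_⟩
  intro x hx
  simp only [List.mem_map] at hx
  obtain ⟨p, hp, rfl⟩ := hx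
  have := hlt p hp
  simp only [List.map_cons, List.map_nil, List.mem_singleton]
  omega

theorem pv_getD_last (ri : List (Int × String)) (cd : Int) (v : String)
    (hnd : (ri.map Prod.fst).Nodup) (hlt : ∀ p ∈ ri, p.1 < cd) :
    (PySem.Dict.mk (ri ++ [(cd, v)])).getD cd "" = v := by
  apply PySem.Dict.getD_of_mem_items
  · simp
  · rw [PySem.Dict.keys_mk]
    exact pv_keys_nodup ri cd v hnd hlt

theorem pv_insert_rep (ri : List (Int × String)) (cd : Int) (cr s : List Char) (c : Char)
    (hlt : ∀ p ∈ ri, p.1 < cd) (hnd : (ri.map Prod.fst).Nodup) (hemp : cr = [] → s = []) :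
    (PySem.Dict.mk (ri ++ pvPad cd cr s)).insert cd
      ((PySem.Dict.mk (ri ++ pvPad cd cr s)).getD cd "" ++ String.ofList [c])
    = PySem.Dict.mk (ri ++ [(cd, String.ofList (s ++ [c]))]) := by
  by_cases hcr : cr = []
  · subst hcr
    rw [hemp rfl]
    rw [show pvPad cd ([] : List Char) ([] : List Char) = [] from rfl, List.append_nil]
    have hcon : (PySem.Dict.mk ri).contains cd = false := pv_contains_of_lt ri cd hlt
    apply PySem.Dict.ext
    rw [PySem.Dict.items_insert_of_not_contains _ _ hcon,
      PySem.Dict.getD_of_not_contains _ _ hcon]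
    simp
  · simp only [pvPad, if_neg hcr]
    have hge := pv_getD_last ri cd (String.ofList s) hnd hlt
    have hcon : (PySem.Dict.mk (ri ++ [(cd, String.ofList s)])).contains cd = true := by
      rw [PySem.Dict.contains_mk]
      simp
    apply PySem.Dict.ext
    rw [PySem.Dict.items_insert_of_contains _ _ hcon, hge]
    show (ri ++ [(cd, String.ofList s)]).map _ = _
    rw [List.map_append]
    congr 1
    · conv_rhs => rw [← List.map_id ri]
      apply List.map_congr_left
      intro p hp
      have := hlt p hp
      have hne : (p.1 == cd) = false := by simp only [beq_eq_false_iff_ne]; omega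
      simp only [hne, Bool.false_eq_true, if_false, id]
    · simp

def pvAStep (st : PySem.Dict Int String × PySem.Dict Int String × Int) (p : Char × Char) :
    PySem.Dict Int String × PySem.Dict Int String × Int :=
  match st with
  | (d1, d2, cc) =>
    let d1' := d1.insert cc (d1.getD cc "" ++ String.ofList [PySem.Chars.upperChar p.1])
    let d2' := d2.insert cc (d2.getD cc "" ++ String.ofList [PySem.Chars.upperChar p.2])
    let ref_codon_len := ((d1'.getD cc "").toList.filter (fun c => PySem.Chars.isalpha c)).length
    if ref_codon_len == 3 then (d1', d2', cc + 1) else (d1', d2', cc)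

theorem pvPad_ne (cd : Int) (cr s : List Char) (h : cr ≠ []) :
    pvPad cd cr s = [(cd, String.ofList s)] := if_neg h

theorem pv_loop_eq (ms : List (Char × Char)) :
    ∀ (ri qi : List (Int × String)) (cr cq : List Char) (cd : Int),
    (∀ p ∈ ms, p.1 ≠ ' ') →
    (∀ p ∈ ri, p.1 < cd) → (ri.map Prod.fst).Nodup →
    (∀ p ∈ qi, p.1 < cd) → (qi.map Prod.fst).Nodup →
    cr.length = cq.length →
    (cr.filter PySem.Chars.isalpha).length < 3 →
    ms.foldl pvAStep (PySem.Dict.mk (ri ++ pvPad cd cr cr), PySem.Dict.mk (qi ++ pvPad cd cr cq), cd)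
    = ((fun R => (PySem.Dict.mk (R.1 ++ pvPad R.2.2.2.2.2 R.2.2.1 R.2.2.1),
                  PySem.Dict.mk (R.2.1 ++ pvPad R.2.2.2.2.2 R.2.2.1 R.2.2.2.1), R.2.2.2.2.2))
        (ms.foldl split_to_codons_altStep (ri, qi, cr, cq, ((cr.filter PySem.Chars.isalpha).length : Int), cd))) := by
  induction ms with
  | nil => intros; rfl
  | cons p ms ih =>
    intro ri qi cr cq cd hms hlt1 hnd1 hlt2 hnd2 hlen hcnt
    obtain ⟨rc0, qc⟩ := p
    have hrc0 : rc0 ≠ ' ' := hms (rc0, qc) (List.mem_cons_self)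
    have hms' : ∀ q ∈ ms, q.1 ≠ ' ' := fun q hq => hms q (List.mem_cons_of_mem _ hq)
    have hempq : cr = [] → cq = [] := by
      intro h
      subst h
      exact List.eq_nil_of_length_eq_zero hlen.symm
    rw [List.foldl_cons, List.foldl_cons]
    have hb : (rc0 == ' ') = false := by simp [hrc0]
    simp only [pvAStep, split_to_codons_altStep, hb, Bool.false_eq_true, if_false]
    rw [pv_insert_rep ri cd cr cr (PySem.Chars.upperChar rc0) hlt1 hnd1 (fun h => h),
      pv_insert_rep qi cd cr cq (PySem.Chars.upperChar qc) hlt2 hnd2 hempq,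
      pv_getD_last ri cd _ hnd1 hlt1]
    set rc := PySem.Chars.upperChar rc0 with hrc
    set n := (cr.filter PySem.Chars.isalpha).length with hn
    have htl : (String.ofList (cr ++ [rc])).toList = cr ++ [rc] := by simp
    rw [htl, List.filter_append, List.length_append]
    by_cases halpha : PySem.Chars.isalpha rc
    · have h1 : (List.filter (fun c => PySem.Chars.isalpha c) [rc]).length = 1 := by
        simp [halpha]
      rw [h1]
      by_cases h3 : n + 1 = 3
      · have hA3 : (n + 1 == 3) = true := by simp [h3]
        have hB3 : ((n : Int) + 1 == 3) = true := by
          rw [beq_iff_eq]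
          exact_mod_cast h3
        rw [hA3, hB3]
        simp only [if_true]
        rw [if_pos halpha]
        have := ih (ri ++ [(cd, String.ofList (cr ++ [rc]))])
          (qi ++ [(cd, String.ofList (cq ++ [PySem.Chars.upperChar qc]))]) [] [] (cd + 1) hms'
          (by intro p hp; rcases List.mem_append.mp hp with h | h
              · have := hlt1 p h; omega
              · rw [List.mem_singleton] at h; subst h; show cd < cd + 1; omega)
          (pv_keys_nodup ri cd _ hnd1 hlt1)
          (by intro p hp; rcases List.mem_append.mp hp with h | h
              · have := hlt2 p h; omega
              · rw [List.mem_singleton] at h; subst h; show cd < cd + 1; omega)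
          (pv_keys_nodup qi cd _ hnd2 hlt2)
          rfl (by simp)
        rw [show pvPad (cd + 1) ([] : List Char) ([] : List Char) = [] from rfl,
          List.append_nil, List.append_nil] at this
        exact this
      · have hA3 : (n + 1 == 3) = false := by
          simp only [beq_eq_false_iff_ne]
          exact h3
        have hB3 : ((n : Int) + 1 == 3) = false := by
          rw [beq_eq_false_iff_ne]
          intro h
          exact h3 (by exact_mod_cast h)
        rw [hA3, hB3]
        simp only [Bool.false_eq_true, if_false]
        rw [if_pos halpha]
        have hlen' : ((cr ++ [rc]).filter PySem.Chars.isalpha).length = n + 1 := by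
          rw [List.filter_append, List.length_append]
          simp [halpha, ← hn]
        have := ih ri qi (cr ++ [rc]) (cq ++ [PySem.Chars.upperChar qc]) cd hms'
          hlt1 hnd1 hlt2 hnd2 (by simp [hlen]) (by omega)
        rw [hlen'] at this
        have hcast : ((n + 1 : Nat) : Int) = (n : Int) + 1 := by push_cast; ring
        rw [hcast] at this
        rw [pvPad_ne cd _ (cr ++ [rc]) (by simp), pvPad_ne cd _ (cq ++ [PySem.Chars.upperChar qc]) (by simp)] at this
        exact this
    · have h1 : (List.filter (fun c => PySem.Chars.isalpha c) [rc]).length = 0 := by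
        simp [halpha]
      rw [h1]
      have hA3 : (n + 0 == 3) = false := by simp; omega
      rw [hA3]
      simp only [Bool.false_eq_true, if_false]
      rw [if_neg (by simp [halpha])]
      have hlen' : ((cr ++ [rc]).filter PySem.Chars.isalpha).length = n := by
        rw [List.filter_append, List.length_append]
        simp [halpha, ← hn]
      have := ih ri qi (cr ++ [rc]) (cq ++ [PySem.Chars.upperChar qc]) cd hms'
        hlt1 hnd1 hlt2 hnd2 (by simp [hlen]) (by omega)
      rw [hlen'] at this
      rw [pvPad_ne cd _ (cr ++ [rc]) (by simp), pvPad_ne cd _ (cq ++ [PySem.Chars.upperChar qc]) (by simp)] at this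
      exact this

theorem pv_range_fold (ms : List (Char × Char)) (init : PySem.Dict Int String × PySem.Dict Int String × Int) :
    (PySem.List.pyRange 0 ((ms.map Prod.fst).length : Int) 1).foldl
      (split_to_codonsStep (ms.map Prod.fst) (ms.map Prod.snd)) init
    = ms.foldl pvAStep init := by
  have hf : ∀ i, PySem.List.pyGetD (ms.map Prod.fst) i ' ' = (PySem.List.pyGetD ms i (' ', ' ')).1 :=
    fun i => PySem.List.pyGetD_map Prod.fst ms i (' ', ' ')
  have hs : ∀ i, PySem.List.pyGetD (ms.map Prod.snd) i ' ' = (PySem.List.pyGetD ms i (' ', ' ')).2 :=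
    fun i => PySem.List.pyGetD_map Prod.snd ms i (' ', ' ')
  have hfun : split_to_codonsStep (ms.map Prod.fst) (ms.map Prod.snd)
      = fun st i => pvAStep st (PySem.List.pyGetD ms i (' ', ' ')) := by
    funext st i
    obtain ⟨d1, d2, cc⟩ := st
    simp only [split_to_codonsStep, pvAStep, hf, hs]
  rw [List.length_map, hfun]
  exact PySem.List.foldl_pyRange_zero_pyGetD' ms (' ', ' ') pvAStep init

theorem pv_bfold_filter (zs : List (Char × Char))
    (init : List (Int × String) × List (Int × String) × List Char × List Char × Int × Int) :
    zs.foldl split_to_codons_altStep init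
    = (zs.filter (fun p => p.1 != ' ')).foldl split_to_codons_altStep init := by
  rw [List.foldl_filter]
  have : (fun (st : List (Int × String) × List (Int × String) × List Char × List Char × Int × Int)
      (p : Char × Char) => if (p.1 != ' ') = true then split_to_codons_altStep st p else st)
      = split_to_codons_altStep := by
    funext st p
    obtain ⟨ri, qi, cr, cq, a, cd⟩ := st
    obtain ⟨rc, qc⟩ := p
    by_cases h : rc = ' ' <;> simp [split_to_codons_altStep, h]
  rw [this]

theorem split_to_codons_spec : Claim_equal_split_to_codons := by
  intro ref que hdom hpre
  unfold Spec_split_to_codons split_to_codons split_to_codons_alt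
  have hpre' : ∀ k : Nat, k < ref.toList.length → ref.toList.getD k ' ' ≠ ' ' →
      k < que.toList.length := hpre
  have hmerge := pv_merge_fold ref.toList que.toList hpre' ref.toList 0 [] [] (by simp)
  rw [Nat.cast_zero, List.drop_zero] at hmerge
  simp only [List.nil_append] at hmerge
  dsimp only
  rw [hmerge]
  rw [pv_range_fold ((ref.toList.zip que.toList).filter (fun p => p.1 != ' '))]
  rw [pv_bfold_filter]
  have hms : ∀ p ∈ (ref.toList.zip que.toList).filter (fun p => p.1 != ' '), p.1 ≠ ' ' := by
    intro p hp
    have := (List.mem_filter.mp hp).2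
    simpa using this
  have hloop := pv_loop_eq ((ref.toList.zip que.toList).filter (fun p => p.1 != ' '))
    [] [] [] [] 1 hms (by simp) (by simp) (by simp) (by simp) rfl (by simp)
  rw [show pvPad 1 ([] : List Char) ([] : List Char) = [] from rfl] at hloop
  simp only [List.append_nil] at hloop
  rw [show ((([] : List Char).filter PySem.Chars.isalpha).length : Int) = 0 from rfl] at hloop
  rw [show (PySem.Dict.mk [] : PySem.Dict Int String) = PySem.Dict.empty from rfl] at hloop
  rw [hloop]
  rcases e : ((ref.toList.zip que.toList).filter (fun p => p.1 != ' ')).foldl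
      split_to_codons_altStep ([], [], [], [], 0, 1) with ⟨ri', qi', cr', cq', a', cd'⟩
  rw [e]
  cases cr' with
  | nil => simp [pvPad]
  | cons c cs => simp [pvPad]
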